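-- pv_equiv track=rewrite | github.com/hadd24667/medisync_autocomplete | feature_extract.py | infer_routes_from_forms
-- ===== SOURCE A (Python) =====
-- def infer_routes_from_forms(form_types):
--     out = set()
--     if any(ft in {"tablet", "capsule", "syrup"} for ft in form_types):
--         out.add("oral")
--     if "suppository" in form_types:
--         out.add("rectal")
--     if "injection" in form_types:
--         out.add("injection")
--     return out
-- ===== SOURCE B (Python) =====
-- def infer_routes_from_forms(form_types):
--     oral = rectal = inj = False
--     for ft in form_types:
--         if ft in ("tablet", "capsule", "syrup"):
--             oral = True
--         elif ft == "suppository":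
--             rectal = True
--         elif ft == "injection":
--             inj = True
--     return {route for flag, route in
--             ((oral, "oral"), (rectal, "rectal"), (inj, "injection")) if flag}
-- ===== Notes on version B (the rewrite author's own statement) =====
-- stated objective: alternative
-- what changed: Replaces A's three independent membership scans of form_types with a single pass maintaining three boolean flags in an accumulator, then assembles the result set from the flags.
import Mathlib
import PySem

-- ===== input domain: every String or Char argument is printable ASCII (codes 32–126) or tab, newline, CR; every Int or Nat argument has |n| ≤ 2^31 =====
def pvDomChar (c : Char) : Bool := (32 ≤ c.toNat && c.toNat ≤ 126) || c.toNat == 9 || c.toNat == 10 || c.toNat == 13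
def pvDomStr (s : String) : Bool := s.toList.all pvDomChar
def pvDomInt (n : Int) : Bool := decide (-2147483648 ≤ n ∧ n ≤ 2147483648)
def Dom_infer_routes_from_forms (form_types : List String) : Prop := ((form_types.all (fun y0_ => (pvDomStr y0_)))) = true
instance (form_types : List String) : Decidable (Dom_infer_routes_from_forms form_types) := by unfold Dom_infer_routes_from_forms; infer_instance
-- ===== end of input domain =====

-- B replaces A's three independent membership scans of form_types with a single
-- pass maintaining three boolean flags, then assembles the set from the flags
-- (alternative decomposition; same cost). Proved equal on all inputs.

-- ===== PORT A =====
def infer_routes_from_forms (form_types : List String) : List String :=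
  let out : PySem.Set String := PySem.Set.empty
  let out := if form_types.any (fun ft =>
      PySem.Set.contains (PySem.Set.ofList ["tablet", "capsule", "syrup"]) ft)
    then PySem.Set.add out "oral" else out
  let out := if form_types.contains "suppository" then PySem.Set.add out "rectal" else out
  let out := if form_types.contains "injection" then PySem.Set.add out "injection" else out
  out

-- ===== PORT B =====
-- one loop iteration of Source B: the if/elif chain updating the three flags
def pvRoutesStep (s : Bool × Bool × Bool) (ft : String) : Bool × Bool × Bool :=
  if List.contains ["tablet", "capsule", "syrup"] ft then (true, s.2.1, s.2.2)
  else if ft == "suppository" then (s.1, true, s.2.2)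
  else if ft == "injection" then (s.1, s.2.1, true)
  else s

def infer_routes_from_forms_alt (form_types : List String) : List String :=
  let flags := form_types.foldl pvRoutesStep (false, false, false)
  -- set comprehension over the three (flag, route) pairs
  [(flags.1, "oral"), (flags.2.1, "rectal"), (flags.2.2, "injection")].foldl
    (fun acc p => if p.1 then PySem.Set.add acc p.2 else acc) PySem.Set.empty

-- ===== PRECONDITION & SPEC =====
def Spec_infer_routes_from_forms (form_types : List String) (out : List String) : Prop := out = infer_routes_from_forms_alt form_types
instance (form_types : List String) (out : List String) : Decidable (Spec_infer_routes_from_forms form_types out) := by unfold Spec_infer_routes_from_forms; infer_instance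

-- ===== CLAIM (what is proved, stated in full; the proofs are below) =====
def Claim_equal_infer_routes_from_forms : Prop := ∀ (form_types : List String), Dom_infer_routes_from_forms form_types → Spec_infer_routes_from_forms form_types (infer_routes_from_forms form_types)

-- ===== LEMMAS AND PROOFS =====

theorem pv_contains_ofList (xs : List String) (x : String) :
    PySem.Set.contains (PySem.Set.ofList xs) x = xs.contains x := by
  rw [Bool.eq_iff_iff]
  simp [PySem.Set.mem_ofList]

-- characterisation of B's single-pass flag fold
theorem pv_step_or (x : String) (s : Bool × Bool × Bool) :
    pvRoutesStep s x
      = (s.1 || List.contains ["tablet", "capsule", "syrup"] x,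
         s.2.1 || (x == "suppository"), s.2.2 || (x == "injection")) := by
  unfold pvRoutesStep
  by_cases h1 : List.contains ["tablet", "capsule", "syrup"] x = true
  · rcases (by simpa using h1 : x = "tablet" ∨ x = "capsule" ∨ x = "syrup") with rfl | rfl | rfl <;>
      simp
  · rw [Bool.not_eq_true] at h1
    obtain ⟨n1, n2, n3⟩ : x ≠ "tablet" ∧ x ≠ "capsule" ∧ x ≠ "syrup" := by
      simpa [not_or] using h1
    by_cases h2 : (x == "suppository") = true
    · have hx := eq_of_beq h2
      subst hx
      simp
    · rw [Bool.not_eq_true] at h2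
      by_cases h3 : (x == "injection") = true
      · simp [n1, n2, n3, h2, h3]
      · rw [Bool.not_eq_true] at h3
        simp [n1, n2, n3, h2, h3]

theorem pv_flags_fold (fts : List String) (a b c : Bool) :
    fts.foldl pvRoutesStep (a, b, c)
      = (a || fts.any (fun ft => List.contains ["tablet", "capsule", "syrup"] ft),
         b || fts.contains "suppository",
         c || fts.contains "injection") := by
  induction fts generalizing a b c with
  | nil => simp
  | cons x xs ih =>
    rw [List.foldl_cons, pv_step_or, ih]
    simp [List.any_cons, Bool.or_assoc, eq_comm, Bool.beq_eq_decide_eq]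

-- ===== VERDICT (by name: the statement is the Claim_ definition above) =====
theorem infer_routes_from_forms_spec : Claim_equal_infer_routes_from_forms := by
  intro fts _
  show infer_routes_from_forms fts = infer_routes_from_forms_alt fts
  unfold infer_routes_from_forms infer_routes_from_forms_alt
  simp only [pv_contains_ofList, pv_flags_fold, Bool.false_or, List.foldl_cons, List.foldl_nil]
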